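-- pv_equiv track=rewrite | github.com/dnovosel19/FER | PREDIPLOMSKI/6. semestar/UUUI/lab2/solution.py | funkcija_za_pamcenje_puta
-- ===== SOURCE A (Python) =====
-- def funkcija_za_pamcenje_puta(pamtim_put, skup_novnastalih_elemenata, biljezi_indeks_puta, prvi, drugi):    # novi skup zapisujemo u pamti_put
--     for par in pamtim_put:      # ako vec postoji takav skup onda da ne dupliciramo zapis ignoriramo ga
--         i = par[0]
--         if i == skup_novnastalih_elemenata:
--             return False
--
--     for k, el in enumerate(pamtim_put):
--         for j, elmnt in enumerate(pamtim_put):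
--             if k != j:
--                 skupic = set()
--                 for a in el[0]:
--                     if (a != prvi) and (a != drugi):
--                         skupic.add(a)
--                 for b in elmnt[0]:
--                     if (b != prvi) and (b != drugi):
--                         skupic.add(b)
--                 if skupic == skup_novnastalih_elemenata:    # kada napunimo skup provjeravamo jesu li novonastali i ovaj skup identicni jer onda smo nasli prethodnike koji cine trenutni skup
--                     pamtim_put.append((skup_novnastalih_elemenata, biljezi_indeks_puta, k, j))
--                     return True
--     return False
-- ===== SOURCE B (Python) =====
-- def funkcija_za_pamcenje_puta(pamtim_put, skup_novnastalih_elemenata, biljezi_indeks_puta, prvi, drugi):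
--     if any(par[0] == skup_novnastalih_elemenata for par in pamtim_put):
--         return False
--     cands = [(i, reduced) for i, par in enumerate(pamtim_put)
--              for reduced in [{x for x in par[0] if x != prvi and x != drugi}]
--              if reduced <= skup_novnastalih_elemenata]
--     for k, rk in cands:
--         need = skup_novnastalih_elemenata - rk
--         for j, rj in cands:
--             if j != k and need <= rj:
--                 pamtim_put.append((skup_novnastalih_elemenata, biljezi_indeks_puta, k, j))
--                 return True
--     return False
-- ===== Notes on version B (the rewrite author's own statement) =====
-- stated objective: faster
-- what changed: B precomputes each entry's reduced set once and prunes the candidate list to subsets of the target, then tests pairs with a set-difference/subset check (need <= rj) instead of rebuilding and comparing the filtered union element by element for every ordered pair.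
import Mathlib
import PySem

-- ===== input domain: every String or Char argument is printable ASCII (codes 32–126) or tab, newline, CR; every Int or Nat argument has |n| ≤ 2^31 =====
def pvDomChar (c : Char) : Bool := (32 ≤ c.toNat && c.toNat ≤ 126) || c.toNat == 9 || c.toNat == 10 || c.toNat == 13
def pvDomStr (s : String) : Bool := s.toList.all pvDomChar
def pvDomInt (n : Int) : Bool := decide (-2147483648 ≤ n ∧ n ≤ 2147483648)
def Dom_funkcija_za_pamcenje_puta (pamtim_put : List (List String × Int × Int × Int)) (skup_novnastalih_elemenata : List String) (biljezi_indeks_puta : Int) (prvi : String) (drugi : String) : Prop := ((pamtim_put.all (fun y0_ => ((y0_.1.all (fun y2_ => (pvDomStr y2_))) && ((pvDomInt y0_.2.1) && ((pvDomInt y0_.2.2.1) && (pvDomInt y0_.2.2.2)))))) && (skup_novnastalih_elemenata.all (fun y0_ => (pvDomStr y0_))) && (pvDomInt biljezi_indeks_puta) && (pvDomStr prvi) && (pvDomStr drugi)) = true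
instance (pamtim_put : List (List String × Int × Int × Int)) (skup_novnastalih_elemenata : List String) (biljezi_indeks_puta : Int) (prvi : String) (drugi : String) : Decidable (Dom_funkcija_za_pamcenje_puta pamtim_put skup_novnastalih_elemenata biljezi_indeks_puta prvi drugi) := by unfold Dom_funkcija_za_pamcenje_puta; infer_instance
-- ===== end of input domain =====

-- B precomputes each entry's reduced set once, keeps only the subset-of-target candidates,
-- and tests pairs by a difference/subset check instead of rebuilding the filtered union per pair.
-- A mutates pamtim_put (appends the found tuple before returning True); B performs the same
-- mutation; the equivalence proved here is about the RETURN value.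

-- ===== PORT A =====
-- first loop of A: "for par in pamtim_put: if par[0] == skup: return False"
def pvDupA (pamtim_put : List (List String × Int × Int × Int)) (skup : List String) : Bool :=
  match pamtim_put with
  | [] => false
  | par :: rest => if PySem.Set.equal par.1 skup then true else pvDupA rest skup

-- "skupic = set(); for a in el[0]: if a != prvi and a != drugi: skupic.add(a); for b in elmnt[0]: …"
def pvSkupicA (el elmnt : List String) (prvi drugi : String) : PySem.Set String :=
  let s1 := el.foldl (fun s a => if a != prvi && a != drugi then PySem.Set.add s a else s) PySem.Set.empty
  elmnt.foldl (fun s b => if b != prvi && b != drugi then PySem.Set.add s b else s) s1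

def funkcija_za_pamcenje_puta (pamtim_put : List (List String × Int × Int × Int)) (skup_novnastalih_elemenata : List String) (biljezi_indeks_puta : Int) (prvi : String) (drugi : String) : Bool :=
  if pvDupA pamtim_put skup_novnastalih_elemenata then false
  else
    -- nested enumerate loops; the append-then-return-True is a mutation, the return value is True
    (PySem.List.enumerate pamtim_put).any (fun ke =>
      (PySem.List.enumerate pamtim_put).any (fun je =>
        ke.1 != je.1 &&
          PySem.Set.equal (pvSkupicA ke.2.1 je.2.1 prvi drugi) skup_novnastalih_elemenata))

-- ===== PORT B =====
def pvCandsB (pamtim_put : List (List String × Int × Int × Int)) (skup : List String) (prvi drugi : String) : List (Int × PySem.Set String) :=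
  (PySem.List.enumerate pamtim_put).filterMap (fun ip =>
    let reduced := PySem.Set.ofList (ip.2.1.filter (fun x => x != prvi && x != drugi))
    if PySem.Set.issubset reduced skup then some (ip.1, reduced) else none)

def funkcija_za_pamcenje_puta_alt (pamtim_put : List (List String × Int × Int × Int)) (skup_novnastalih_elemenata : List String) (biljezi_indeks_puta : Int) (prvi : String) (drugi : String) : Bool :=
  if pamtim_put.any (fun par => PySem.Set.equal par.1 skup_novnastalih_elemenata) then false
  else
    let cands := pvCandsB pamtim_put skup_novnastalih_elemenata prvi drugi
    cands.any (fun kr =>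
      let need := PySem.Set.diff skup_novnastalih_elemenata kr.2
      cands.any (fun jr => jr.1 != kr.1 && PySem.Set.issubset need jr.2))

-- ===== PRECONDITION & SPEC =====
def Spec_funkcija_za_pamcenje_puta (pamtim_put : List (List String × Int × Int × Int)) (skup_novnastalih_elemenata : List String) (biljezi_indeks_puta : Int) (prvi : String) (drugi : String) (out : Bool) : Prop := out = funkcija_za_pamcenje_puta_alt pamtim_put skup_novnastalih_elemenata biljezi_indeks_puta prvi drugi
instance (pamtim_put : List (List String × Int × Int × Int)) (skup_novnastalih_elemenata : List String) (biljezi_indeks_puta : Int) (prvi : String) (drugi : String) (out : Bool) : Decidable (Spec_funkcija_za_pamcenje_puta pamtim_put skup_novnastalih_elemenata biljezi_indeks_puta prvi drugi out) := by unfold Spec_funkcija_za_pamcenje_puta; infer_instance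

-- ===== CLAIM (what is proved, stated in full; the proofs are below) =====
def Claim_equal_funkcija_za_pamcenje_puta : Prop := ∀ (pamtim_put : List (List String × Int × Int × Int)) (skup_novnastalih_elemenata : List String) (biljezi_indeks_puta : Int) (prvi : String) (drugi : String), Dom_funkcija_za_pamcenje_puta pamtim_put skup_novnastalih_elemenata biljezi_indeks_puta prvi drugi → Spec_funkcija_za_pamcenje_puta pamtim_put skup_novnastalih_elemenata biljezi_indeks_puta prvi drugi (funkcija_za_pamcenje_puta pamtim_put skup_novnastalih_elemenata biljezi_indeks_puta prvi drugi)

-- ===== LEMMAS AND PROOFS =====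

-- membership in the fold that builds skupic
theorem pv_mem_foldl_filter_add (l : List String) (prvi drugi : String) (s : PySem.Set String) (y : String) :
    (y ∈ l.foldl (fun s a => if a != prvi && a != drugi then PySem.Set.add s a else s) s)
      ↔ y ∈ s ∨ (y ∈ l ∧ y ≠ prvi ∧ y ≠ drugi) := by
  induction l generalizing s with
  | nil => simp
  | cons x xs ih =>
    simp only [List.foldl_cons, ih, List.mem_cons]
    split_ifs with h
    · simp only [PySem.Set.mem_add, bne_iff_ne, Bool.and_eq_true, ne_eq] at *
      obtain ⟨h1, h2⟩ := h
      by_cases hyx : y = x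
      · subst hyx; simp [h1, h2]
      · tauto
    · simp only [bne_iff_ne, Bool.and_eq_true, ne_eq, not_and_or, not_not] at h
      rcases h with rfl | rfl <;> tauto

theorem pv_mem_skupic (el elmnt : List String) (prvi drugi : String) (y : String) :
    y ∈ pvSkupicA el elmnt prvi drugi ↔
      ((y ∈ el ∨ y ∈ elmnt) ∧ y ≠ prvi ∧ y ≠ drugi) := by
  unfold pvSkupicA
  simp only [pv_mem_foldl_filter_add]
  unfold PySem.Set.empty
  simp only [List.not_mem_nil, false_or]
  tauto

-- membership in the reduced set B computes
theorem pv_mem_reduced (l : List String) (prvi drugi : String) (y : String) :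
    y ∈ PySem.Set.ofList (l.filter (fun x => x != prvi && x != drugi)) ↔
      (y ∈ l ∧ y ≠ prvi ∧ y ≠ drugi) := by
  simp [PySem.Set.mem_ofList, List.mem_filter]

-- the pair test of A equals the pair test of B, pointwise
theorem pv_pair_iff (el elmnt skup : List String) (prvi drugi : String) :
    PySem.Set.equal (pvSkupicA el elmnt prvi drugi) skup = true ↔
      (PySem.Set.issubset (PySem.Set.ofList (el.filter (fun x => x != prvi && x != drugi))) skup = true ∧
       PySem.Set.issubset (PySem.Set.ofList (elmnt.filter (fun x => x != prvi && x != drugi))) skup = true ∧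
       PySem.Set.issubset
         (PySem.Set.diff skup (PySem.Set.ofList (el.filter (fun x => x != prvi && x != drugi))))
         (PySem.Set.ofList (elmnt.filter (fun x => x != prvi && x != drugi))) = true) := by
  simp only [PySem.Set.equal_iff, PySem.Set.issubset_iff, pv_mem_skupic, pv_mem_reduced,
    PySem.Set.mem_diff]
  constructor
  · intro h
    refine ⟨fun x hx => (h x).1 (by tauto), fun x hx => (h x).1 (by tauto), ?_⟩
    intro x hx
    rcases hx with ⟨hs, hnr⟩
    have := (h x).2 hs
    tauto
  · rintro ⟨h1, h2, h3⟩ x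
    constructor
    · rintro ⟨he, hp⟩
      rcases he with he | he
      · exact h1 x ⟨he, hp⟩
      · exact h2 x ⟨he, hp⟩
    · intro hs
      by_cases hr : x ∈ el ∧ x ≠ prvi ∧ x ≠ drugi
      · exact ⟨Or.inl hr.1, hr.2⟩
      · have := h3 x ⟨hs, hr⟩
        exact ⟨Or.inr this.1, this.2⟩

-- A's duplicate loop equals B's any
theorem pv_dup_eq (pamtim_put : List (List String × Int × Int × Int)) (skup : List String) :
    pvDupA pamtim_put skup = pamtim_put.any (fun par => PySem.Set.equal par.1 skup) := by
  induction pamtim_put with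
  | nil => rfl
  | cons par rest ih =>
    unfold pvDupA
    simp only [List.any_cons, ← ih]
    split_ifs with h <;> simp [h]

-- membership in cands
theorem pv_mem_cands (pamtim_put : List (List String × Int × Int × Int)) (skup : List String)
    (prvi drugi : String) (c : Int × PySem.Set String) :
    c ∈ pvCandsB pamtim_put skup prvi drugi ↔
      ∃ ip ∈ PySem.List.enumerate pamtim_put,
        c = (ip.1, PySem.Set.ofList (ip.2.1.filter (fun x => x != prvi && x != drugi))) ∧
        PySem.Set.issubset (PySem.Set.ofList (ip.2.1.filter (fun x => x != prvi && x != drugi))) skup = true := by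
  unfold pvCandsB
  simp only [List.mem_filterMap]
  constructor
  · rintro ⟨ip, hip, h⟩
    by_cases hs : PySem.Set.issubset (PySem.Set.ofList (ip.2.1.filter (fun x => x != prvi && x != drugi))) skup = true
    · rw [if_pos hs] at h
      exact ⟨ip, hip, (Option.some_inj.mp h).symm, hs⟩
    · rw [if_neg hs] at h
      cases h
  · rintro ⟨ip, hip, rfl, hs⟩
    exact ⟨ip, hip, by simp [hs]⟩

-- the nested anys coincide
theorem pv_body_eq (pamtim_put : List (List String × Int × Int × Int)) (skup : List String)
    (prvi drugi : String) :
    ((PySem.List.enumerate pamtim_put).any (fun ke =>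
      (PySem.List.enumerate pamtim_put).any (fun je =>
        ke.1 != je.1 && PySem.Set.equal (pvSkupicA ke.2.1 je.2.1 prvi drugi) skup)))
    = ((pvCandsB pamtim_put skup prvi drugi).any (fun kr =>
        (pvCandsB pamtim_put skup prvi drugi).any (fun jr =>
          jr.1 != kr.1 && PySem.Set.issubset (PySem.Set.diff skup kr.2) jr.2))) := by
  have bext : ∀ (x y : Bool), (x = true ↔ y = true) → x = y := by decide
  apply bext
  simp only [List.any_eq_true, Bool.and_eq_true, bne_iff_ne, ne_eq]
  constructor
  · rintro ⟨ke, hke, je, hje, hkj, heq⟩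
    rw [pv_pair_iff] at heq
    rcases heq with ⟨h1, h2, h3⟩
    refine ⟨(ke.1, PySem.Set.ofList (ke.2.1.filter (fun x => x != prvi && x != drugi))),
      (pv_mem_cands _ _ _ _ _).mpr ⟨ke, hke, rfl, h1⟩,
      (je.1, PySem.Set.ofList (je.2.1.filter (fun x => x != prvi && x != drugi))),
      (pv_mem_cands _ _ _ _ _).mpr ⟨je, hje, rfl, h2⟩,
      fun h => hkj h.symm, h3⟩
  · rintro ⟨kr, hkr, jr, hjr, hne, hsub⟩
    rw [pv_mem_cands] at hkr hjr
    rcases hkr with ⟨ke, hke, rfl, hks⟩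
    rcases hjr with ⟨je, hje, rfl, hjs⟩
    refine ⟨ke, hke, je, hje, fun h => hne h.symm, ?_⟩
    rw [pv_pair_iff]
    exact ⟨hks, hjs, hsub⟩

-- ===== VERDICT (by name: the statement is the Claim_ definition above) =====
theorem funkcija_za_pamcenje_puta_spec : Claim_equal_funkcija_za_pamcenje_puta := by
  intro pamtim_put skup biljezi prvi drugi _
  unfold Spec_funkcija_za_pamcenje_puta funkcija_za_pamcenje_puta funkcija_za_pamcenje_puta_alt
  rw [pv_dup_eq]
  split_ifs with h
  · rfl
  · exact pv_body_eq pamtim_put skup prvi drugi
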